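-- pv_equiv track=rewrite | github.com/aniketsharma21/tree_models | tree_models/explainability/reason_codes.py | _apply_casual_language
-- ===== SOURCE A (Python) =====
-- def _apply_casual_language(text: str) -> str:
--     """Apply casual language transformations."""
--
--     # Replace formal terms with casual ones
--     casual_replacements = {
--         "the applicant": "you",
--         "influences": "affects",
--         "elevates": "increases",
--         "reduces": "decreases"
--     }
--
--     for formal, casual in casual_replacements.items():
--         text = text.replace(formal, casual)
--
--     return text
-- ===== SOURCE B (Python) =====
-- def _apply_casual_language(text: str) -> str:
--     """Apply casual language transformations (single left-to-right scan)."""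
--
--     pairs = [
--         ("the applicant", "you"),
--         ("influences", "affects"),
--         ("elevates", "increases"),
--         ("reduces", "decreases"),
--     ]
--
--     out = []
--     i = 0
--     n = len(text)
--     while i < n:
--         for formal, casual in pairs:
--             if text.startswith(formal, i):
--                 out.append(casual)
--                 i += len(formal)
--                 break
--         else:
--             out.append(text[i])
--             i += 1
--     return "".join(out)
-- ===== Notes on version B (the rewrite author's own statement) =====
-- stated objective: alternative
-- what changed: Replaces A's four sequential full-text str.replace passes by one single left-to-right scan that at each position tries the four formal/casual pairs in order, emitting the replacement or copying the character.
import Mathlib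
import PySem

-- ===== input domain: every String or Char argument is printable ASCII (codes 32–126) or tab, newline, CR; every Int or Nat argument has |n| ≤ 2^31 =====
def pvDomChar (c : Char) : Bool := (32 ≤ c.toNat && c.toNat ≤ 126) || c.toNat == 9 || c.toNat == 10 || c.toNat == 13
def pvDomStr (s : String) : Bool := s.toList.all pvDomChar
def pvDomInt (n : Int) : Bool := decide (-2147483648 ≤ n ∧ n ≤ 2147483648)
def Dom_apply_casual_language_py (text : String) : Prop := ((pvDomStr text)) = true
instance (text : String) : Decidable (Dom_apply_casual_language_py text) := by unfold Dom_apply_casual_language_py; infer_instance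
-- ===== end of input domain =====

-- B replaces A's four sequential full-text str.replace passes by a single left-to-right scan that
-- tries the four formal/casual pairs at each position (objective: alternative, same output proved).

-- ===== PORT A =====
def apply_casual_language_py (text : String) : String :=
  let text := PySem.Str.replace text "the applicant" "you"
  let text := PySem.Str.replace text "influences" "affects"
  let text := PySem.Str.replace text "elevates" "increases"
  let text := PySem.Str.replace text "reduces" "decreases"
  text

-- ===== PORT B =====
-- the pairs list of Source B (as char lists)
def pvPairs : List (List Char × List Char) :=
  [("the applicant".toList, "you".toList),
   ("influences".toList, "affects".toList),
   ("elevates".toList, "increases".toList),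
   ("reduces".toList, "decreases".toList)]

-- Source B's while-loop: at each position, the first matching pair (Source B's inner for-loop = find?)
-- is emitted and skipped, otherwise one character is copied
def pvScan : List Char → List Char
  | [] => []
  | c :: t =>
    match pvPairs.find? (fun kv => kv.1.isPrefixOf (c :: t)) with
    | some (k, v) => v ++ pvScan (t.drop (k.length - 1))
    | none => c :: pvScan t
termination_by l => l.length
decreasing_by
  · simp only [List.length_cons]
    have : (t.drop (k.length - 1)).length ≤ t.length := by
      simp [List.length_drop]
    omega
  · simp

def apply_casual_language_py_alt (text : String) : String :=
  String.ofList (pvScan text.toList)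

-- ===== PRECONDITION & SPEC =====
def Spec_apply_casual_language_py (text : String) (out : String) : Prop := out = apply_casual_language_py_alt text
instance (text : String) (out : String) : Decidable (Spec_apply_casual_language_py text out) := by unfold Spec_apply_casual_language_py; infer_instance

-- ===== CLAIM (what is proved, stated in full; the proofs are below) =====
def Claim_equal_apply_casual_language_py : Prop := ∀ (text : String), Dom_apply_casual_language_py text → Spec_apply_casual_language_py text (apply_casual_language_py text)

-- ===== LEMMAS AND PROOFS =====

-- the four formal terms and their casual replacements, as char lists
def pvK1 : List Char := "the applicant".toList
def pvV1 : List Char := "you".toList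
def pvK2 : List Char := "influences".toList
def pvV2 : List Char := "affects".toList
def pvK3 : List Char := "elevates".toList
def pvV3 : List Char := "increases".toList
def pvK4 : List Char := "reduces".toList
def pvV4 : List Char := "decreases".toList

-- clean structural recursion equal to PySem.Chars.replace for a nonempty pattern
def pvRepl (old new : List Char) : List Char → List Char
  | [] => []
  | c :: t =>
    if old.isPrefixOf (c :: t) then new ++ pvRepl old new (t.drop (old.length - 1))
    else c :: pvRepl old new t
termination_by l => l.length
decreasing_by
  · simp only [List.length_cons]
    have : (t.drop (old.length - 1)).length ≤ t.length := by
      simp [List.length_drop]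
    omega
  · simp

theorem pvRepl_nil (old new : List Char) : pvRepl old new [] = [] := by
  simp [pvRepl]

theorem pvRepl_cons (old new : List Char) (c : Char) (t : List Char) :
    pvRepl old new (c :: t) =
      if old.isPrefixOf (c :: t) then new ++ pvRepl old new (t.drop (old.length - 1))
      else c :: pvRepl old new t := by
  rw [pvRepl]

theorem pvRepl_neg {old : List Char} (new : List Char) {c : Char} {t : List Char}
    (h : ¬ old <+: c :: t) : pvRepl old new (c :: t) = c :: pvRepl old new t := by
  rw [pvRepl_cons, if_neg (by simpa [List.isPrefixOf_iff_prefix] using h)]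

theorem pvRepl_match (old new b : List Char) (h : old ≠ []) :
    pvRepl old new (old ++ b) = new ++ pvRepl old new b := by
  obtain ⟨o, os, rfl⟩ := List.exists_cons_of_ne_nil h
  rw [List.cons_append, pvRepl_cons,
    if_pos (by simp [List.isPrefixOf_iff_prefix])]
  simp

-- bridge: PySem's fuel/accumulator loop computes pvRepl
theorem pv_go_eq (old new : List Char) (h : old ≠ []) :
    ∀ fuel l acc, l.length ≤ fuel →
      PySem.Chars.replace.go old new fuel l acc = acc.reverse ++ pvRepl old new l := by
  intro fuel
  induction fuel with
  | zero =>
    intro l acc hl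
    have : l = [] := List.length_eq_zero_iff.mp (Nat.le_zero.mp hl)
    subst this
    simp [PySem.Chars.replace.go, pvRepl_nil]
  | succ f ih =>
    intro l acc hl
    cases l with
    | nil => simp [PySem.Chars.replace.go, pvRepl_nil]
    | cons c t =>
      obtain ⟨o, os, rfl⟩ := List.exists_cons_of_ne_nil h
      simp only [PySem.Chars.replace.go]
      by_cases hp : (o :: os).isPrefixOf (c :: t)
      · rw [if_pos hp]
        have hlen : (List.drop (o :: os).length (c :: t)).length ≤ f := by
          simp only [List.length_drop, List.length_cons] at *
          omega
        rw [ih _ _ hlen, pvRepl_cons, if_pos hp]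
        simp
      · rw [if_neg hp]
        have hlen : t.length ≤ f := by simp at hl; omega
        rw [ih _ _ hlen, pvRepl_cons, if_neg hp]
        simp

theorem pv_replace_eq (l old new : List Char) (h : old ≠ []) :
    PySem.Chars.replace l old new = pvRepl old new l := by
  unfold PySem.Chars.replace
  rw [if_neg (by simpa [List.isEmpty_iff] using h)]
  simpa using pv_go_eq old new h l.length l [] le_rfl

-- "no nonempty suffix of a is prefix-compatible with p": p can never match starting inside a
def pvNoTouch (a p : List Char) : Bool :=
  a.tails.all fun s => s.isEmpty || (!(s.isPrefixOf p) && !(p.isPrefixOf s))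

theorem pvNoTouch_spec {a p : List Char} (h : pvNoTouch a p = true) :
    ∀ s, s <:+ a → s ≠ [] → ¬ s <+: p ∧ ¬ p <+: s := by
  intro s hs hne
  have := (List.all_eq_true.mp h) s ((List.mem_tails s a).mpr hs)
  simp [List.isEmpty_iff, hne] at this
  exact ⟨fun hc => by rw [← List.isPrefixOf_iff_prefix] at hc; simp [this.1] at hc,
         fun hc => by rw [← List.isPrefixOf_iff_prefix] at hc; simp [this.2] at hc⟩

-- a match of p cannot start inside a block a it cannot touch: replace skips over a
theorem pv_boundary (p v : List Char) :
    ∀ (a b : List Char), (∀ s, s <:+ a → s ≠ [] → ¬ s <+: p ∧ ¬ p <+: s) →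
      pvRepl p v (a ++ b) = a ++ pvRepl p v b := by
  intro a
  induction a with
  | nil => simp
  | cons c a' ih =>
    intro b H
    have hnp : ¬ p <+: (c :: a') ++ b := by
      intro hp
      rcases List.prefix_or_prefix_of_prefix hp (List.prefix_append (c :: a') b) with h1 | h1
      · exact (H (c :: a') List.suffix_rfl (by simp)).2 h1
      · exact (H (c :: a') List.suffix_rfl (by simp)).1 h1
    rw [List.cons_append, pvRepl_neg v (by simpa using hnp),
      ih b (fun s hs hne => H s (hs.trans (List.suffix_cons c a')) hne)]
    simp

-- if q was no prefix before the pass, it is none afterwards (q cannot touch the replacement v)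
theorem pv_noPre (p v q0 : List Char)
    (hv : ∀ s, s <:+ q0 → s ≠ [] → ¬ s <+: v ∧ ¬ v <+: s) :
    ∀ n l, l.length = n → ∀ q, q <:+ q0 → ¬ q <+: l → ¬ q <+: pvRepl p v l := by
  intro n
  induction n using Nat.strong_induction_on with
  | _ n ih =>
    intro l hn q hq hql hcontr
    have hqne : q ≠ [] := fun h => hql (h ▸ List.nil_prefix)
    cases l with
    | nil => rw [pvRepl_nil] at hcontr; exact hqne (List.prefix_nil.mp hcontr)
    | cons c t =>
      by_cases hp : p <+: c :: t
      · rw [pvRepl_cons, if_pos (List.isPrefixOf_iff_prefix.mpr hp)] at hcontr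
        rcases List.prefix_or_prefix_of_prefix hcontr (List.prefix_append v _) with h1 | h1
        · exact (hv q hq hqne).1 h1
        · exact (hv q hq hqne).2 h1
      · rw [pvRepl_neg v hp] at hcontr
        obtain ⟨c', q', rfl⟩ := List.exists_cons_of_ne_nil hqne
        obtain ⟨rfl, hq'⟩ := List.cons_prefix_cons.mp hcontr
        have hql' : ¬ q' <+: t := fun h => hql (List.cons_prefix_cons.mpr ⟨rfl, h⟩)
        have hlt : t.length < n := by simp at hn; omega
        exact ih t.length hlt t rfl q' ((List.suffix_cons c' q').trans hq) hql' hq'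

-- A's four passes composed
def pvChain (l : List Char) : List Char :=
  pvRepl pvK4 pvV4 (pvRepl pvK3 pvV3 (pvRepl pvK2 pvV2 (pvRepl pvK1 pvV1 l)))

theorem pv_drop_cons (k : List Char) (c : Char) (t : List Char) (h : k ≠ []) :
    (c :: t).drop k.length = t.drop (k.length - 1) := by
  obtain ⟨o, os, rfl⟩ := List.exists_cons_of_ne_nil h
  simp

theorem pv_main : ∀ n l, l.length = n → pvChain l = pvScan l := by
  intro n
  induction n using Nat.strong_induction_on with
  | _ n ih =>
    intro l hn
    cases l with
    | nil => simp [pvChain, pvRepl_nil, pvScan]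
    | cons c t =>
      have ne1 : pvK1 ≠ [] := by decide
      have ne2 : pvK2 ≠ [] := by decide
      have ne3 : pvK3 ≠ [] := by decide
      have ne4 : pvK4 ≠ [] := by decide
      by_cases h1 : pvK1 <+: c :: t
      · -- "the applicant" matches at the head
        obtain ⟨rest, hrest⟩ := h1
        have hdrop : t.drop (pvK1.length - 1) = rest := by
          rw [← pv_drop_cons pvK1 c t ne1, ← hrest, List.drop_left]
        have hlt : rest.length < n := by
          have hL := congrArg List.length hrest
          have hk : 0 < pvK1.length := by decide
          simp at hL hn
          omega
        have hchain : pvChain (c :: t) = pvV1 ++ pvChain rest := by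
          unfold pvChain
          rw [← hrest, pvRepl_match pvK1 pvV1 rest ne1,
            pv_boundary pvK2 pvV2 pvV1 _ (pvNoTouch_spec (by decide)),
            pv_boundary pvK3 pvV3 pvV1 _ (pvNoTouch_spec (by decide)),
            pv_boundary pvK4 pvV4 pvV1 _ (pvNoTouch_spec (by decide))]
        have hb : pvK1.isPrefixOf (c :: t) = true :=
          List.isPrefixOf_iff_prefix.mpr ⟨rest, hrest⟩
        have hscan : pvScan (c :: t) = pvV1 ++ pvScan (t.drop (pvK1.length - 1)) := by
          rw [pvScan]
          simp only [pvPairs, List.find?_cons]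
          rw [show ("the applicant".toList.isPrefixOf (c :: t)) = true from hb]
          rfl
        rw [hchain, hscan, hdrop, ih rest.length hlt rest rfl]
      · by_cases h2 : pvK2 <+: c :: t
        · -- "influences" matches at the head
          obtain ⟨rest, hrest⟩ := h2
          have hdrop : t.drop (pvK2.length - 1) = rest := by
            rw [← pv_drop_cons pvK2 c t ne2, ← hrest, List.drop_left]
          have hlt : rest.length < n := by
            have hL := congrArg List.length hrest
            have hk : 0 < pvK2.length := by decide
            simp at hL hn
            omega
          have hchain : pvChain (c :: t) = pvV2 ++ pvChain rest := by
            unfold pvChain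
            rw [← hrest,
              pv_boundary pvK1 pvV1 pvK2 rest (pvNoTouch_spec (by decide)),
              pvRepl_match pvK2 pvV2 _ ne2,
              pv_boundary pvK3 pvV3 pvV2 _ (pvNoTouch_spec (by decide)),
              pv_boundary pvK4 pvV4 pvV2 _ (pvNoTouch_spec (by decide))]
          have hb1 : pvK1.isPrefixOf (c :: t) = false :=
            Bool.eq_false_iff.mpr (fun hb => h1 (List.isPrefixOf_iff_prefix.mp hb))
          have hb2 : pvK2.isPrefixOf (c :: t) = true :=
            List.isPrefixOf_iff_prefix.mpr ⟨rest, hrest⟩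
          have hscan : pvScan (c :: t) = pvV2 ++ pvScan (t.drop (pvK2.length - 1)) := by
            rw [pvScan]
            simp only [pvPairs, List.find?_cons]
            rw [show ("the applicant".toList.isPrefixOf (c :: t)) = false from hb1,
              show ("influences".toList.isPrefixOf (c :: t)) = true from hb2]
            rfl
          rw [hchain, hscan, hdrop, ih rest.length hlt rest rfl]
        · by_cases h3 : pvK3 <+: c :: t
          · -- "elevates" matches at the head
            obtain ⟨rest, hrest⟩ := h3
            have hdrop : t.drop (pvK3.length - 1) = rest := by
              rw [← pv_drop_cons pvK3 c t ne3, ← hrest, List.drop_left]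
            have hlt : rest.length < n := by
              have hL := congrArg List.length hrest
              have hk : 0 < pvK3.length := by decide
              simp at hL hn
              omega
            have hchain : pvChain (c :: t) = pvV3 ++ pvChain rest := by
              unfold pvChain
              rw [← hrest,
                pv_boundary pvK1 pvV1 pvK3 rest (pvNoTouch_spec (by decide)),
                pv_boundary pvK2 pvV2 pvK3 _ (pvNoTouch_spec (by decide)),
                pvRepl_match pvK3 pvV3 _ ne3,
                pv_boundary pvK4 pvV4 pvV3 _ (pvNoTouch_spec (by decide))]
            have hb1 : pvK1.isPrefixOf (c :: t) = false :=
              Bool.eq_false_iff.mpr (fun hb => h1 (List.isPrefixOf_iff_prefix.mp hb))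
            have hb2 : pvK2.isPrefixOf (c :: t) = false :=
              Bool.eq_false_iff.mpr (fun hb => h2 (List.isPrefixOf_iff_prefix.mp hb))
            have hb3 : pvK3.isPrefixOf (c :: t) = true :=
              List.isPrefixOf_iff_prefix.mpr ⟨rest, hrest⟩
            have hscan : pvScan (c :: t) = pvV3 ++ pvScan (t.drop (pvK3.length - 1)) := by
              rw [pvScan]
              simp only [pvPairs, List.find?_cons]
              rw [show ("the applicant".toList.isPrefixOf (c :: t)) = false from hb1,
                show ("influences".toList.isPrefixOf (c :: t)) = false from hb2,
                show ("elevates".toList.isPrefixOf (c :: t)) = true from hb3]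
              rfl
            rw [hchain, hscan, hdrop, ih rest.length hlt rest rfl]
          · by_cases h4 : pvK4 <+: c :: t
            · -- "reduces" matches at the head
              obtain ⟨rest, hrest⟩ := h4
              have hdrop : t.drop (pvK4.length - 1) = rest := by
                rw [← pv_drop_cons pvK4 c t ne4, ← hrest, List.drop_left]
              have hlt : rest.length < n := by
                have hL := congrArg List.length hrest
                have hk : 0 < pvK4.length := by decide
                simp at hL hn
                omega
              have hchain : pvChain (c :: t) = pvV4 ++ pvChain rest := by
                unfold pvChain
                rw [← hrest,
                  pv_boundary pvK1 pvV1 pvK4 rest (pvNoTouch_spec (by decide)),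
                  pv_boundary pvK2 pvV2 pvK4 _ (pvNoTouch_spec (by decide)),
                  pv_boundary pvK3 pvV3 pvK4 _ (pvNoTouch_spec (by decide)),
                  pvRepl_match pvK4 pvV4 _ ne4]
              have hb1 : pvK1.isPrefixOf (c :: t) = false :=
                Bool.eq_false_iff.mpr (fun hb => h1 (List.isPrefixOf_iff_prefix.mp hb))
              have hb2 : pvK2.isPrefixOf (c :: t) = false :=
                Bool.eq_false_iff.mpr (fun hb => h2 (List.isPrefixOf_iff_prefix.mp hb))
              have hb3 : pvK3.isPrefixOf (c :: t) = false :=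
                Bool.eq_false_iff.mpr (fun hb => h3 (List.isPrefixOf_iff_prefix.mp hb))
              have hb4 : pvK4.isPrefixOf (c :: t) = true :=
                List.isPrefixOf_iff_prefix.mpr ⟨rest, hrest⟩
              have hscan : pvScan (c :: t) = pvV4 ++ pvScan (t.drop (pvK4.length - 1)) := by
                rw [pvScan]
                simp only [pvPairs, List.find?_cons]
                rw [show ("the applicant".toList.isPrefixOf (c :: t)) = false from hb1,
                  show ("influences".toList.isPrefixOf (c :: t)) = false from hb2,
                  show ("elevates".toList.isPrefixOf (c :: t)) = false from hb3,
                  show ("reduces".toList.isPrefixOf (c :: t)) = true from hb4]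
                rfl
              rw [hchain, hscan, hdrop, ih rest.length hlt rest rfl]
            · -- no key matches at the head: every pass keeps the head character
              have hlt : t.length < n := by simp at hn; omega
              have e1 : pvRepl pvK1 pvV1 (c :: t) = c :: pvRepl pvK1 pvV1 t :=
                pvRepl_neg pvV1 h1
              have np2 : ¬ pvK2 <+: c :: pvRepl pvK1 pvV1 t := by
                rw [← e1]
                exact pv_noPre pvK1 pvV1 pvK2 (pvNoTouch_spec (by decide))
                  (c :: t).length (c :: t) rfl pvK2 List.suffix_rfl h2
              have e2 : pvRepl pvK2 pvV2 (c :: pvRepl pvK1 pvV1 t) =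
                  c :: pvRepl pvK2 pvV2 (pvRepl pvK1 pvV1 t) := pvRepl_neg pvV2 np2
              have np3 : ¬ pvK3 <+: c :: pvRepl pvK2 pvV2 (pvRepl pvK1 pvV1 t) := by
                rw [← e2, ← e1]
                exact pv_noPre pvK2 pvV2 pvK3 (pvNoTouch_spec (by decide))
                  (pvRepl pvK1 pvV1 (c :: t)).length _ rfl pvK3 List.suffix_rfl
                  (pv_noPre pvK1 pvV1 pvK3 (pvNoTouch_spec (by decide))
                    (c :: t).length (c :: t) rfl pvK3 List.suffix_rfl h3)
              have e3 : pvRepl pvK3 pvV3 (c :: pvRepl pvK2 pvV2 (pvRepl pvK1 pvV1 t)) =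
                  c :: pvRepl pvK3 pvV3 (pvRepl pvK2 pvV2 (pvRepl pvK1 pvV1 t)) :=
                pvRepl_neg pvV3 np3
              have np4 : ¬ pvK4 <+:
                  c :: pvRepl pvK3 pvV3 (pvRepl pvK2 pvV2 (pvRepl pvK1 pvV1 t)) := by
                rw [← e3, ← e2, ← e1]
                exact pv_noPre pvK3 pvV3 pvK4 (pvNoTouch_spec (by decide))
                  (pvRepl pvK2 pvV2 (pvRepl pvK1 pvV1 (c :: t))).length _ rfl pvK4
                  List.suffix_rfl
                  (pv_noPre pvK2 pvV2 pvK4 (pvNoTouch_spec (by decide))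
                    (pvRepl pvK1 pvV1 (c :: t)).length _ rfl pvK4 List.suffix_rfl
                    (pv_noPre pvK1 pvV1 pvK4 (pvNoTouch_spec (by decide))
                      (c :: t).length (c :: t) rfl pvK4 List.suffix_rfl h4))
              have e4 : pvRepl pvK4 pvV4
                    (c :: pvRepl pvK3 pvV3 (pvRepl pvK2 pvV2 (pvRepl pvK1 pvV1 t))) =
                  c :: pvRepl pvK4 pvV4
                    (pvRepl pvK3 pvV3 (pvRepl pvK2 pvV2 (pvRepl pvK1 pvV1 t))) :=
                pvRepl_neg pvV4 np4
              have hb1 : pvK1.isPrefixOf (c :: t) = false :=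
                Bool.eq_false_iff.mpr (fun hb => h1 (List.isPrefixOf_iff_prefix.mp hb))
              have hb2 : pvK2.isPrefixOf (c :: t) = false :=
                Bool.eq_false_iff.mpr (fun hb => h2 (List.isPrefixOf_iff_prefix.mp hb))
              have hb3 : pvK3.isPrefixOf (c :: t) = false :=
                Bool.eq_false_iff.mpr (fun hb => h3 (List.isPrefixOf_iff_prefix.mp hb))
              have hb4 : pvK4.isPrefixOf (c :: t) = false :=
                Bool.eq_false_iff.mpr (fun hb => h4 (List.isPrefixOf_iff_prefix.mp hb))
              have hscan : pvScan (c :: t) = c :: pvScan t := by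
                rw [pvScan]
                simp only [pvPairs, List.find?_cons]
                rw [show ("the applicant".toList.isPrefixOf (c :: t)) = false from hb1,
                  show ("influences".toList.isPrefixOf (c :: t)) = false from hb2,
                  show ("elevates".toList.isPrefixOf (c :: t)) = false from hb3,
                  show ("reduces".toList.isPrefixOf (c :: t)) = false from hb4]
                rfl
              have hchain : pvChain (c :: t) = c :: pvChain t := by
                unfold pvChain
                rw [e1, e2, e3, e4]
              rw [hchain, hscan, ih t.length hlt t rfl]

-- converting A's chained Str.replace calls into pvChain
theorem pv_A_toList (s : String) :
    (apply_casual_language_py s).toList = pvChain s.toList := by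
  simp only [apply_casual_language_py, PySem.Str.toList_replace]
  rw [pv_replace_eq _ _ _ (show "reduces".toList ≠ [] by decide),
    pv_replace_eq _ _ _ (show "elevates".toList ≠ [] by decide),
    pv_replace_eq _ _ _ (show "influences".toList ≠ [] by decide),
    pv_replace_eq _ _ _ (show "the applicant".toList ≠ [] by decide)]
  rfl

-- ===== VERDICT (by name: the statement is the Claim_ definition above) =====
theorem apply_casual_language_py_spec : Claim_equal_apply_casual_language_py := by
  intro text _
  show apply_casual_language_py text = apply_casual_language_py_alt text
  calc apply_casual_language_py text
      = String.ofList (apply_casual_language_py text).toList := by simp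
    _ = String.ofList (pvScan text.toList) := by
        rw [pv_A_toList, pv_main text.toList.length text.toList rfl]
    _ = apply_casual_language_py_alt text := rfl
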